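-- pv_equiv track=rewrite | github.com/gruuuve/AI-CS540 | Clustering_HW4/pokemon_stats.py | calculate_x_y
-- ===== SOURCE A (Python) =====
-- def calculate_x_y(stats):
--     # x calc: offensive strength x = Attack + Sp. Atk + Speed
--     # y cal: defensive strength y = Defense + Sp. Def + HP
--     off_keys = ['Attack', 'Sp. Atk', 'Speed']
--     def_keys = ['Defense', 'Sp. Def', 'HP']
--     x = 0
--     y = 0
--     for key in stats:
--         if key in off_keys:
--             x = x + stats.get(key)
--         elif key in def_keys:
--             y = y + stats.get(key)
--     return (x, y)
-- ===== SOURCE B (Python) =====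
-- def calculate_x_y(stats):
--     # Closed-form: look up the six known keys directly, missing keys count 0.
--     g = stats.get
--     return (g('Attack', 0) + g('Sp. Atk', 0) + g('Speed', 0),
--             g('Defense', 0) + g('Sp. Def', 0) + g('HP', 0))
-- ===== Notes on version B (the rewrite author's own statement) =====
-- stated objective: simpler
-- what changed: Replaces A's scan over all dict keys with membership tests and re-lookups by six direct stats.get(key, 0) lookups of the fixed offensive/defensive keys in closed form.
import Mathlib
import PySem

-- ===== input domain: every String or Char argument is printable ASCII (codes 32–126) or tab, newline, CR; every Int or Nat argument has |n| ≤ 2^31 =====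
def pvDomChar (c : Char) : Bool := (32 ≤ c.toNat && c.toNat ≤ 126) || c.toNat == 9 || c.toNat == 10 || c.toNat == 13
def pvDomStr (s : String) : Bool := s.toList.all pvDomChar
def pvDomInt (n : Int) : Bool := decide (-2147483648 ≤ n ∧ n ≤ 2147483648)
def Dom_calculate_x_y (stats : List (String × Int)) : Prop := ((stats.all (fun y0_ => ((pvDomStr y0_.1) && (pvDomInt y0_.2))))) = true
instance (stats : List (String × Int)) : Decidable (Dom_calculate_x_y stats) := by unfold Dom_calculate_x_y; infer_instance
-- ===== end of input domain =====

-- B replaces A's scan over all dict keys with six direct get(key, 0) lookups of the fixed keys (simpler, closed form).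

-- ===== PORT A =====
-- 'for key in stats' iterates the dict's keys in insertion order; 'stats.get(key)' is a lookup.
def calculate_x_y (stats : List (String × Int)) : Int × Int :=
  let off_keys : List String := ["Attack", "Sp. Atk", "Speed"]
  let def_keys : List String := ["Defense", "Sp. Def", "HP"]
  let xy : Int × Int :=
    stats.foldl (fun xy p =>
      if p.1 ∈ off_keys then (xy.1 + (PySem.Dict.mk stats).getD p.1 0, xy.2)
      else if p.1 ∈ def_keys then (xy.1, xy.2 + (PySem.Dict.mk stats).getD p.1 0)
      else xy) (0, 0)
  xy

-- ===== PORT B =====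
def calculate_x_y_alt (stats : List (String × Int)) : Int × Int :=
  let g : String → Int := fun k => (PySem.Dict.mk stats).getD k 0
  (g "Attack" + g "Sp. Atk" + g "Speed", g "Defense" + g "Sp. Def" + g "HP")

-- ===== PRECONDITION & SPEC =====
-- stats is a Python dict, whose keys are necessarily distinct; Pre_ states exactly that
-- (it excludes no input the Python function can receive).
def Pre_calculate_x_y (stats : List (String × Int)) : Prop := (stats.map Prod.fst).Nodup
instance (stats : List (String × Int)) : Decidable (Pre_calculate_x_y stats) := by unfold Pre_calculate_x_y; infer_instance
def pvWitness_calculate_x_y : (List (String × Int)) := [("Attack", 3), ("HP", 5), ("Name", 7)]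
def Spec_calculate_x_y (stats : List (String × Int)) (out : Int × Int) : Prop := out = calculate_x_y_alt stats
instance (stats : List (String × Int)) (out : Int × Int) : Decidable (Spec_calculate_x_y stats out) := by unfold Spec_calculate_x_y; infer_instance

-- ===== CLAIM (what is proved, stated in full; the proofs are below) =====
def Claim_equal_calculate_x_y : Prop := ∀ (stats : List (String × Int)), Dom_calculate_x_y stats → Pre_calculate_x_y stats → Spec_calculate_x_y stats (calculate_x_y stats)

-- ===== LEMMAS AND PROOFS =====

-- per-key sum of values in the association list
def pvKeySum (l : List (String × Int)) (k : String) : Int :=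
  (l.map (fun p => if p.1 = k then p.2 else 0)).sum

theorem pvKeySum_cons (a : String × Int) (l : List (String × Int)) (k : String) :
    pvKeySum (a :: l) k = (if a.1 = k then a.2 else 0) + pvKeySum l k := by
  simp [pvKeySum]

theorem pvKeySum_of_not_mem (l : List (String × Int)) (k : String)
    (h : k ∉ l.map Prod.fst) : pvKeySum l k = 0 := by
  induction l with
  | nil => rfl
  | cons a t ih =>
    simp only [List.map_cons, List.mem_cons, not_or] at h
    rw [pvKeySum_cons, ih h.2, if_neg (fun hk => h.1 hk.symm)]
    ring

-- under distinct keys, a dict lookup is the per-key sum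
theorem getD_eq_pvKeySum (l : List (String × Int)) (k : String)
    (h : (l.map Prod.fst).Nodup) :
    (PySem.Dict.mk l).getD k 0 = pvKeySum l k := by
  induction l with
  | nil => rfl
  | cons a t ih =>
    simp only [List.map_cons, List.nodup_cons] at h
    rw [PySem.Dict.getD_eq_get?_getD, PySem.Dict.get?_mk_cons, pvKeySum_cons]
    by_cases hk : a.1 = k
    · subst hk
      rw [if_pos (by simp), if_pos rfl, pvKeySum_of_not_mem t a.1 h.1]
      simp
    · rw [if_neg (by simpa using hk), if_neg hk,
        ← PySem.Dict.getD_eq_get?_getD, ih h.2]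
      ring

-- A's fold after replacing each lookup by the entry's own value
def pvStep (xy : Int × Int) (p : String × Int) : Int × Int :=
  if p.1 ∈ ["Attack", "Sp. Atk", "Speed"] then (xy.1 + p.2, xy.2)
  else if p.1 ∈ ["Defense", "Sp. Def", "HP"] then (xy.1, xy.2 + p.2)
  else xy

theorem pvFold_eq (l : List (String × Int)) (x y : Int) :
    l.foldl pvStep (x, y) =
      (x + pvKeySum l "Attack" + pvKeySum l "Sp. Atk" + pvKeySum l "Speed",
       y + pvKeySum l "Defense" + pvKeySum l "Sp. Def" + pvKeySum l "HP") := by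
  induction l generalizing x y with
  | nil => simp [pvKeySum]
  | cons a t ih =>
    rw [List.foldl_cons]
    simp only [pvKeySum_cons]
    by_cases h1 : a.1 = "Attack" <;> by_cases h2 : a.1 = "Sp. Atk" <;>
      by_cases h3 : a.1 = "Speed" <;> by_cases h4 : a.1 = "Defense" <;>
      by_cases h5 : a.1 = "Sp. Def" <;> by_cases h6 : a.1 = "HP" <;>
      simp_all [pvStep] <;> ring

theorem calculate_x_y_spec : Claim_equal_calculate_x_y := by
  intro stats _ hpre
  unfold Spec_calculate_x_y calculate_x_y calculate_x_y_alt
  dsimp only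
  have hstep : stats.foldl (fun xy p =>
      if p.1 ∈ ["Attack", "Sp. Atk", "Speed"] then (xy.1 + (PySem.Dict.mk stats).getD p.1 0, xy.2)
      else if p.1 ∈ ["Defense", "Sp. Def", "HP"] then (xy.1, xy.2 + (PySem.Dict.mk stats).getD p.1 0)
      else xy) ((0 : Int), (0 : Int)) = stats.foldl pvStep (0, 0) := by
    apply PySem.List.foldl_congr_mem
    intro a p hp
    have hv : (PySem.Dict.mk stats).getD p.1 0 = p.2 :=
      PySem.Dict.getD_of_mem_items (d := PySem.Dict.mk stats) (by simpa using hp)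
        (by simpa [PySem.Dict.keys] using hpre) 0
    simp [pvStep, hv]
  rw [hstep, pvFold_eq, getD_eq_pvKeySum stats "Attack" hpre,
    getD_eq_pvKeySum stats "Sp. Atk" hpre, getD_eq_pvKeySum stats "Speed" hpre,
    getD_eq_pvKeySum stats "Defense" hpre, getD_eq_pvKeySum stats "Sp. Def" hpre,
    getD_eq_pvKeySum stats "HP" hpre]
  simp only [Prod.mk.injEq]
  constructor <;> ring
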